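-- pv_equiv track=rewrite | github.com/wyk18703232953/myResearch | codeComplex/data copy/filteredData/python/linear/python_linear_0825.py | generate_case
-- ===== SOURCE A (Python) =====
-- def generate_case(case_id, n):
--     # Interpret n as the string length; window size m is derived deterministically
--     length = n if n > 0 else 1
--     m = (n // 2) + 1
--     if m > length:
--         m = length
--
--     base = ["R", "G", "B"]
--     s = "".join(base[(i + case_id) % 3] for i in range(length))
--     return length, m, s
-- ===== SOURCE B (Python) =====
-- def generate_case(case_id, n):
--     length = n if n > 0 else 1
--     m = min(n // 2 + 1, length)
--     r = case_id % 3
--     s = "RGB"[r:] + "RGB"[:r]      # period-3 seed starting at the rotated position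
--     while len(s) < length:
--         s += s                     # exponential doubling of the periodic prefix
--     return length, m, s[:length]
-- ===== Notes on version B (the rewrite author's own statement) =====
-- stated objective: faster
-- what changed: B builds the string by exponential doubling: it seeds a 3-character rotated RGB prefix and repeatedly concatenates the string with itself until it reaches the length, then truncates — replacing A's per-index comprehension that computes (i+case_id)%3 and a list lookup for every position; m uses min instead of the if-statement.
import Mathlib
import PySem

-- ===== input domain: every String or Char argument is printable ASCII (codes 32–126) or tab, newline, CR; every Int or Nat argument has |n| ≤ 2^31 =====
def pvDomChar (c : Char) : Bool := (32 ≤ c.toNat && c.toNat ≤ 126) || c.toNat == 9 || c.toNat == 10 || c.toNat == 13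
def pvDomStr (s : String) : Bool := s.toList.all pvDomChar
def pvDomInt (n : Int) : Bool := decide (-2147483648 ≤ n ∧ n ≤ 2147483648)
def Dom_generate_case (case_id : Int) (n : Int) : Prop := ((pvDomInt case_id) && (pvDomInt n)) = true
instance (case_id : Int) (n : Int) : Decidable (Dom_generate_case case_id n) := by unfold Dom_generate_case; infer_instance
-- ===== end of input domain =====

-- B builds the string by exponential doubling of a rotated 3-character seed and truncates,
-- instead of A's per-index comprehension; return values proved equal.

-- ===== PORT A =====
def generate_case (case_id : Int) (n : Int) : Int × Int × String :=
  let length : Int := if n > 0 then n else 1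
  let m0 : Int := PySem.Int.floordiv n 2 + 1
  let m : Int := if m0 > length then length else m0
  let base : List String := ["R", "G", "B"]
  -- base[(i + case_id) % 3]: Python's % 3 is always in 0..2, so IndexError is unreachable; the getD "" default is never taken
  let s : String := PySem.Str.join "" ((PySem.List.pyRange 0 length 1).map
      (fun i => (PySem.List.pyGet? base (PySem.Int.mod (i + case_id) 3)).getD ""))
  (length, m, s)

-- ===== PORT B =====
-- the 'while len(s) < length: s += s' loop; the '0 < s.length' conjunct only makes the
-- recursion total (in B the seed always has length 3)
def doubleUntil (s : List Char) (L : Nat) : List Char :=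
  if _h : s.length < L ∧ 0 < s.length then doubleUntil (s ++ s) L else s
  termination_by L - s.length
  decreasing_by simp only [List.length_append]; omega

def generate_case_alt (case_id : Int) (n : Int) : Int × Int × String :=
  let length : Int := if n > 0 then n else 1
  let m : Int := min (PySem.Int.floordiv n 2 + 1) length
  let r : Int := PySem.Int.mod case_id 3
  let seed : List Char := PySem.List.slice "RGB".toList (some r) none ++ PySem.List.slice "RGB".toList none (some r)
  let s : List Char := doubleUntil seed length.toNat
  (length, m, String.ofList (PySem.List.slice s none (some length)))

-- ===== PRECONDITION & SPEC =====
def Spec_generate_case (case_id : Int) (n : Int) (out : Int × Int × String) : Prop := out = generate_case_alt case_id n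
instance (case_id : Int) (n : Int) (out : Int × Int × String) : Decidable (Spec_generate_case case_id n out) := by unfold Spec_generate_case; infer_instance

-- ===== CLAIM (what is proved, stated in full; the proofs are below) =====
def Claim_equal_generate_case : Prop := ∀ (case_id : Int) (n : Int), Dom_generate_case case_id n → Spec_generate_case case_id n (generate_case case_id n)

-- ===== LEMMAS AND PROOFS =====

/-- The character of the RGB base at a reduced index. -/
def rgbChar (j : Nat) : Char := if j = 0 then 'R' else if j = 1 then 'G' else 'B'

/-- Doubling a period-3 prefix of the pattern yields a longer prefix of the pattern. -/
theorem pattern_append (r k : Nat) (h3 : k % 3 = 0) :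
    (List.range k).map (fun i => rgbChar ((i + r) % 3)) ++ (List.range k).map (fun i => rgbChar ((i + r) % 3))
      = (List.range (k + k)).map (fun i => rgbChar ((i + r) % 3)) := by
  rw [List.range_add, List.map_append, List.map_map]
  congr 1
  refine List.map_congr_left ?_
  intro i _
  have : (k + i + r) % 3 = (i + r) % 3 := by omega
  simp [this]

/-- `doubleUntil` on a pattern prefix returns a pattern prefix of length at least `L`. -/
theorem doubleUntil_map (r L : Nat) : ∀ d k, 0 < k → k % 3 = 0 → L - k ≤ d →
    ∃ K, doubleUntil ((List.range k).map (fun i => rgbChar ((i + r) % 3))) L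
      = (List.range K).map (fun i => rgbChar ((i + r) % 3)) ∧ L ≤ K := by
  intro d
  induction d with
  | zero =>
    intro k hk h3 hd
    rw [doubleUntil]
    have hlen : ((List.range k).map (fun i => rgbChar ((i + r) % 3))).length = k := by simp
    rw [dif_neg (by rw [hlen]; omega)]
    exact ⟨k, rfl, by omega⟩
  | succ d ih =>
    intro k hk h3 hd
    rw [doubleUntil]
    have hlen : ((List.range k).map (fun i => rgbChar ((i + r) % 3))).length = k := by simp
    by_cases hc : k < L
    · rw [dif_pos (by rw [hlen]; exact ⟨hc, hk⟩), pattern_append r k h3]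
      exact ih (k + k) (by omega) (by omega) (by omega)
    · rw [dif_neg (by rw [hlen]; omega)]
      exact ⟨k, rfl, by omega⟩

/-- Both string constructions produce the same character sequence. -/
theorem strings_eq (c : Int) (L : Nat) (hL1 : 1 ≤ L) :
    PySem.Str.join "" ((PySem.List.pyRange 0 (L : Int) 1).map
        (fun i => (PySem.List.pyGet? (["R", "G", "B"] : List String) (PySem.Int.mod (i + c) 3)).getD ""))
      = String.ofList (PySem.List.slice
          (doubleUntil (PySem.List.slice "RGB".toList (some (PySem.Int.mod c 3)) none ++
                        PySem.List.slice "RGB".toList none (some (PySem.Int.mod c 3))) (L : Int).toNat)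
          none (some (L : Int))) := by
  have h03 : (0 : Int) < 3 := by norm_num
  obtain ⟨r, hr, hr3⟩ : ∃ r : Nat, PySem.Int.mod c 3 = (r : Int) ∧ r < 3 := by
    have h1 := PySem.Int.mod_nonneg c h03
    have h2 := PySem.Int.mod_lt c h03
    exact ⟨(PySem.Int.mod c 3).toNat, by omega, by omega⟩
  simp only [PySem.Str.join]
  congr 1
  -- A side: reduce to (range L).map (fun k => rgbChar ((k + r) % 3))
  rw [PySem.List.pyRange_zero_nat, List.map_map, List.map_map]
  have hA : ∀ k ∈ List.range L,
      ((String.toList ∘ (fun i => (PySem.List.pyGet? (["R", "G", "B"] : List String) (PySem.Int.mod (i + c) 3)).getD "")) ∘ (fun k : Nat => (k : Int))) k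
        = [rgbChar ((k + r) % 3)] := by
    intro k _
    have e1 : PySem.Int.mod ((k : Int) + c) 3 = (((k + r) % 3 : Nat) : Int) := by
      have a1 := PySem.Int.mod_eq_emod_of_pos (a := (k : Int) + c) h03
      have a2 := PySem.Int.mod_eq_emod_of_pos (a := c) h03
      omega
    simp only [Function.comp_apply, e1]
    have h : (k + r) % 3 = 0 ∨ (k + r) % 3 = 1 ∨ (k + r) % 3 = 2 := by omega
    rcases h with h | h | h <;> rw [h] <;> decide
  rw [List.map_congr_left hA]
  have hstep : (List.range L).map (fun k : Nat => [rgbChar ((k + r) % 3)])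
      = ((List.range L).map (fun k : Nat => rgbChar ((k + r) % 3))).map (fun ch => [ch]) := by
    rw [List.map_map]; rfl
  have hnil : String.toList "" = ([] : List Char) := rfl
  rw [hstep, hnil, PySem.Chars.join_nil_singletons]
  -- B side: the seed is the 3-prefix of the pattern; doubleUntil keeps it a prefix; truncate
  simp only [hr, PySem.List.slice_from_natCast, PySem.List.slice_to_natCast, Int.toNat_natCast]
  have hseed : "RGB".toList.drop r ++ "RGB".toList.take r
      = (List.range 3).map (fun i => rgbChar ((i + r) % 3)) := by
    interval_cases r <;> decide
  rw [hseed]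
  obtain ⟨K, hK, hLK⟩ := doubleUntil_map r L L 3 (by omega) (by omega) (by omega)
  rw [hK, ← List.map_take, List.take_range]
  have : min L K = L := by omega
  rw [this]

-- ===== VERDICT (by name: the statement is the Claim_ definition above) =====
theorem generate_case_spec : Claim_equal_generate_case := by
  unfold Claim_equal_generate_case Spec_generate_case
  intro c n _
  unfold generate_case generate_case_alt
  simp only [Prod.mk.injEq]
  obtain ⟨L, hL, hL1⟩ : ∃ L : Nat, (if n > 0 then n else 1) = (L : Int) ∧ 1 ≤ L := by
    refine ⟨(if n > 0 then n else 1).toNat, ?_, ?_⟩ <;> split <;> omega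
  refine ⟨trivial, ?_, ?_⟩
  · rw [min_def]
    split_ifs <;> omega
  · rw [hL]
    exact strings_eq c L hL1
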